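-- pv_equiv track=rewrite | github.com/shibing624/agentica | agentica/tools/edit_tool.py | _parse_create_diff
-- ===== SOURCE A (Python) =====
-- from typing import Optional, List, Literal, Callable
-- from dataclasses import dataclass
--
-- @dataclass
-- class ParserState:
--     """State of the diff parser."""
--     lines: List[str]
--     index: int = 0
--     fuzz: int = 0
--
-- END_PATCH = "*** End Patch"
--
-- SECTION_TERMINATORS = [
--     END_PATCH,
--     "*** Update File:",
--     "*** Delete File:",
--     "*** Add File:",
-- ]
--
-- def _is_done(state: ParserState, prefixes: List[str]) -> bool:
--     """Check if parser is done processing."""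
--     if state.index >= len(state.lines):
--         return True
--     if any(state.lines[state.index].startswith(prefix) for prefix in prefixes):
--         return True
--     return False
--
-- def _parse_create_diff(lines: List[str]) -> str:
--     """Parse a create-file diff (all lines start with +)."""
--     parser = ParserState(lines=[*lines, END_PATCH])
--     output: List[str] = []
--
--     while not _is_done(parser, SECTION_TERMINATORS):
--         if parser.index >= len(parser.lines):
--             break
--         line = parser.lines[parser.index]
--         parser.index += 1
--         if not line.startswith("+"):
--             raise ValueError(f"Invalid Add File Line: {line}")
--         output.append(line[1:])
--
--     return "\n".join(output)
-- ===== SOURCE B (Python) =====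
-- END_PATCH = "*** End Patch"
--
-- SECTION_TERMINATORS = [
--     END_PATCH,
--     "*** Update File:",
--     "*** Delete File:",
--     "*** Add File:",
-- ]
--
--
-- def _parse_create_diff(lines):
--     """Parse a create-file diff: find the section boundary first, then validate/strip."""
--     def is_term(line):
--         return any(line.startswith(prefix) for prefix in SECTION_TERMINATORS)
--
--     end = next((i for i, line in enumerate(lines) if is_term(line)), len(lines))
--     kept = lines[:end]
--     for line in kept:
--         if not line.startswith("+"):
--             raise ValueError(f"Invalid Add File Line: {line}")
--     return "\n".join(line[1:] for line in kept)
-- ===== Notes on version B (the rewrite author's own statement) =====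
-- stated objective: simpler
-- what changed: Replaces A's interleaved ParserState index loop (with END_PATCH sentinel append and _is_done helper) by two separate passes: first find the boundary index of the first section terminator and slice the kept prefix, then validate each kept line and join the stripped lines.
import Mathlib
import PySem

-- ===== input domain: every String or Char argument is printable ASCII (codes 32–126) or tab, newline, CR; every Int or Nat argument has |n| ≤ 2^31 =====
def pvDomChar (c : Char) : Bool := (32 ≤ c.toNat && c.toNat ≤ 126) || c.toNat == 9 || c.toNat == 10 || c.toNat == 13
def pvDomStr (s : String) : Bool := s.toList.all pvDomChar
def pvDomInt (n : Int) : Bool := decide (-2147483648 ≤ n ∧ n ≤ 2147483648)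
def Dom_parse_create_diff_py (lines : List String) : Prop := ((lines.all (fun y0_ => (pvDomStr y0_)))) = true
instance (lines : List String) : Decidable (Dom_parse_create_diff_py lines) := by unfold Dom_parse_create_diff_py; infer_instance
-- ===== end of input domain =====

-- B replaces A's interleaved index/state loop by a boundary-finding pass (first terminator
-- index + slice) followed by a separate validate/strip pass; objective: simpler, same cost.
-- On lines where Python raises ValueError (a kept line not starting with '+'), outside Pre_,
-- both ports return a harmless default instead.

-- shared module constant SECTION_TERMINATORS and the any(startswith) test
def pvTerms : List String :=
  ["*** End Patch", "*** Update File:", "*** Delete File:", "*** Add File:"]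

def pvIsTerm (l : String) : Bool := pvTerms.any (fun p => PySem.Str.startswith l p)

-- ===== PORT A =====
-- the while-loop over ParserState: structural recursion over the remaining lines with the
-- accumulated output (lines include the appended END_PATCH sentinel)
def pvLoopA : List String → List String → List String
  | [], out => out
  | l :: rest, out =>
    if pvIsTerm l then out
    else if !(PySem.Str.startswith l "+") then out   -- Python: raise ValueError (outside Pre_)
    else pvLoopA rest (out ++ [PySem.Str.slice l (some 1) none])

def parse_create_diff_py (lines : List String) : String :=
  PySem.Str.join "\n" (pvLoopA (lines ++ ["*** End Patch"]) [])

-- ===== PORT B =====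
-- validate/strip pass over the kept slice (for line in kept: raise / join of line[1:])
def pvValidateStrip (kept : List String) : String :=
  if kept.all (fun l => PySem.Str.startswith l "+")
  then PySem.Str.join "\n" (kept.map (fun l => PySem.Str.slice l (some 1) none))
  else ""                                      -- Python: raise ValueError (outside Pre_)

def parse_create_diff_py_alt (lines : List String) : String :=
  -- end = next((i for i, line in enumerate(lines) if is_term(line)), len(lines)); kept = lines[:end]
  pvValidateStrip
    (PySem.List.slice lines none (some (((lines.findIdx? pvIsTerm).getD lines.length : Nat) : Int)))

-- ===== PRECONDITION & SPEC =====
-- Pre_ excludes exactly the inputs where A raises ValueError: a line before the first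
-- section terminator that does not start with '+'.
def Pre_parse_create_diff_py (lines : List String) : Prop :=
  (lines.takeWhile (fun l => !pvIsTerm l)).all (fun l => PySem.Str.startswith l "+") = true
instance (lines : List String) : Decidable (Pre_parse_create_diff_py lines) := by
  unfold Pre_parse_create_diff_py; infer_instance

def pvWitness_parse_create_diff_py : List String :=
  ["+line one", "+", "*** End Patch", "junk"]

def Spec_parse_create_diff_py (lines : List String) (out : String) : Prop :=
  out = parse_create_diff_py_alt lines
instance (lines : List String) (out : String) : Decidable (Spec_parse_create_diff_py lines out) := by
  unfold Spec_parse_create_diff_py; infer_instance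

-- ===== CLAIM (what is proved, stated in full; the proofs are below) =====
def Claim_equal_parse_create_diff_py : Prop :=
  ∀ (lines : List String), Dom_parse_create_diff_py lines →
    Pre_parse_create_diff_py lines →
    Spec_parse_create_diff_py lines (parse_create_diff_py lines)

-- ===== LEMMAS AND PROOFS =====

theorem pvIsTerm_end_patch : pvIsTerm "*** End Patch" = true := by decide

-- A's loop, under Pre_, produces the stripped takeWhile prefix
theorem pvLoopA_eq (lines : List String)
    (h : (lines.takeWhile (fun l => !pvIsTerm l)).all (fun l => PySem.Str.startswith l "+") = true) :
    ∀ out, pvLoopA (lines ++ ["*** End Patch"]) out =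
      out ++ (lines.takeWhile (fun l => !pvIsTerm l)).map (fun l => PySem.Str.slice l (some 1) none) := by
  induction lines with
  | nil =>
      intro out
      simp [pvLoopA, pvIsTerm_end_patch]
  | cons l rest ih =>
      intro out
      by_cases ht : pvIsTerm l = true
      · simp [pvLoopA, ht, -List.cons_append]
      · have hb : pvIsTerm l = false := by simpa using ht
        have htk : List.takeWhile (fun x => !pvIsTerm x) (l :: rest)
            = l :: List.takeWhile (fun x => !pvIsTerm x) rest := by
          simp [hb]
        rw [htk, List.all_cons, Bool.and_eq_true] at h
        obtain ⟨hplus, hrest⟩ := h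
        rw [htk, List.cons_append]
        simp only [pvLoopA, hb, hplus, Bool.not_true, Bool.false_eq_true, if_false]
        rw [ih hrest]
        simp [List.append_assoc]

-- B's boundary slice is the takeWhile prefix
theorem pvTake_findIdx (lines : List String) :
    lines.take ((lines.findIdx? pvIsTerm).getD lines.length) =
      lines.takeWhile (fun l => !pvIsTerm l) := by
  induction lines with
  | nil => simp
  | cons l rest ih =>
      by_cases ht : pvIsTerm l = true
      · simp [List.findIdx?_cons, ht]
      · have hb : pvIsTerm l = false := by simpa using ht
        cases hfi : rest.findIdx? pvIsTerm with
        | none =>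
            rw [hfi] at ih
            simp only [Option.getD_none] at ih
            simp [List.findIdx?_cons, hb, hfi, ih]
        | some n =>
            rw [hfi] at ih
            simp only [Option.getD_some] at ih
            simp [List.findIdx?_cons, hb, hfi, ih]

-- ===== VERDICT (by name: the statement is the Claim_ definition above) =====
theorem parse_create_diff_py_spec : Claim_equal_parse_create_diff_py := by
  intro lines _ hpre
  unfold Spec_parse_create_diff_py Pre_parse_create_diff_py at *
  unfold parse_create_diff_py parse_create_diff_py_alt pvValidateStrip
  rw [PySem.List.slice_to_natCast, pvTake_findIdx, if_pos hpre, pvLoopA_eq lines hpre]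
  simp
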